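-- pv_equiv track=rewrite | github.com/rahulsunil2/JaldeeTest | main_1.py | consecutiveSum
-- ===== SOURCE A (Python) =====
-- def consecutiveSum(arr, target):
--     res = []
--     for i in range(len(arr)):
--         temp_arr = []
--         for j in range(i, len(arr)):
--             temp_arr.append(j)
--             if sum(temp_arr) > target:
--                 break
--             if sum(temp_arr) == target and len(temp_arr) > 1:
--                 res.append(temp_arr)
--                 break
--     return res
-- ===== SOURCE B (Python) =====
-- def consecutiveSum(arr, target):
--     # A run of L consecutive indices starting at i sums to L*i + L*(L-1)//2, so
--     # instead of scanning starts, enumerate run lengths L and solve for the start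
--     # by divisibility; longer valid runs start strictly earlier, so descending L
--     # emits the runs already ordered by ascending start index.
--     n = len(arr)
--     res = []
--     for L in range(n, 1, -1):
--         rem = target - L * (L - 1) // 2
--         if rem >= 0 and rem % L == 0:
--             i = rem // L
--             if i + L <= n:
--                 res.append(list(range(i, i + L)))
--     return res
-- ===== Notes on version B (the rewrite author's own statement) =====
-- stated objective: faster
-- what changed: B abandons A's per-start window scan entirely: it enumerates candidate run lengths L (descending), solves L*i + L*(L-1)/2 = target for the start i by a divisibility test, and emits each run directly; descending L yields the runs in A's ascending-start order, so no scan and no sort is needed.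
import Mathlib
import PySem

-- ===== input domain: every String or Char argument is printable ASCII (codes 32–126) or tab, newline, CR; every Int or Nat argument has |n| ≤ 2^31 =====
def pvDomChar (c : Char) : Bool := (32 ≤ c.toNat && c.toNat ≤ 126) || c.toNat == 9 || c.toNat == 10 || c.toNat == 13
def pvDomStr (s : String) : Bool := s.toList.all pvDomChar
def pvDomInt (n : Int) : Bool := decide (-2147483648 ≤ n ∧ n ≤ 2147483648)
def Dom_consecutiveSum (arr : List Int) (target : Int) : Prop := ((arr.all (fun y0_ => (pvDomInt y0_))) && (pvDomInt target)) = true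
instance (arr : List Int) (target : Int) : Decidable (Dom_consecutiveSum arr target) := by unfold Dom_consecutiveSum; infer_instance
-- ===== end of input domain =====

-- B replaces A's per-start index scan by enumerating candidate run LENGTHS L (descending)
-- and solving L*i + L*(L-1)/2 = target for the start i by a divisibility test.

-- ===== PORT A =====
-- inner 'for j in range(i, len(arr))' loop of A; 'some t' = the run appended before breaking
def csA_inner (target : Int) (n : Nat) (j : Nat) (temp : List Int) : Option (List Int) :=
  if _h : j < n then
    if (temp ++ [(j : Int)]).sum > target then none
    else if (temp ++ [(j : Int)]).sum = target ∧ 1 < (temp ++ [(j : Int)]).length then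
      some (temp ++ [(j : Int)])
    else csA_inner target n (j + 1) (temp ++ [(j : Int)])
  else none
termination_by n - j

def consecutiveSum (arr : List Int) (target : Int) : List (List Int) :=
  (List.range arr.length).foldl (fun res i =>
    match csA_inner target arr.length i [] with
    | some t => res ++ [t]
    | none => res) []

-- ===== PORT B =====
-- 'for L in range(n, 1, -1): rem = target - L*(L-1)//2; if rem >= 0 and rem % L == 0: i = rem // L; if i + L <= n: res.append(list(range(i, i+L)))'
def consecutiveSum_alt (arr : List Int) (target : Int) : List (List Int) :=
  (PySem.List.pyRange (arr.length : Int) 1 (-1)).foldl (fun res L =>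
    let rem := target - PySem.Int.floordiv (L * (L - 1)) 2
    if 0 ≤ rem ∧ PySem.Int.mod rem L = 0 then
      let i := PySem.Int.floordiv rem L
      if i + L ≤ (arr.length : Int) then res ++ [PySem.List.pyRange i (i + L) 1] else res
    else res) []

-- ===== PRECONDITION & SPEC =====
def Spec_consecutiveSum (arr : List Int) (target : Int) (out : List (List Int)) : Prop := out = consecutiveSum_alt arr target
instance (arr : List Int) (target : Int) (out : List (List Int)) : Decidable (Spec_consecutiveSum arr target out) := by unfold Spec_consecutiveSum; infer_instance

-- ===== CLAIM (what is proved, stated in full; the proofs are below) =====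
def Claim_equal_consecutiveSum : Prop := ∀ (arr : List Int) (target : Int), Dom_consecutiveSum arr target → Spec_consecutiveSum arr target (consecutiveSum arr target)

-- ===== LEMMAS AND PROOFS =====

-- the run of L consecutive integers starting at i, as B emits it
def runI (i L : Int) : List Int := PySem.List.pyRange i (i + L) 1

-- 'the run of length L starting at i is a valid answer': L ≥ 2, fits in [0, n), sums to target
def Good (n : Nat) (t i L : Int) : Prop :=
  2 ≤ L ∧ 0 ≤ i ∧ i + L ≤ (n : Int) ∧ 2 * t = 2 * L * i + L * (L - 1)

-- the per-length body of B, as an Option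
def GB (n : Nat) (t L : Int) : Option (List Int) :=
  let rem := t - PySem.Int.floordiv (L * (L - 1)) 2
  if 0 ≤ rem ∧ PySem.Int.mod rem L = 0 then
    let i := PySem.Int.floordiv rem L
    if i + L ≤ (n : Int) then some (PySem.List.pyRange i (i + L) 1) else none
  else none

-- the index list A carries at inner state j when the loop started at i: [i, …, j-1] as Ints
def intRange (i j : Nat) : List Int := (List.range' i (j - i)).map Int.ofNat

def keyR (r : List Int) : Int := r.headD 0

theorem intRange_snoc (i j : Nat) (h : i ≤ j) :
    intRange i (j + 1) = intRange i j ++ [(j : Int)] := by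
  unfold intRange
  have h1 : j + 1 - i = (j - i) + 1 := by omega
  rw [h1, List.range'_concat, List.map_append]
  simp
  omega

theorem intRange_eq_pyRange (i j : Nat) (h : i ≤ j) :
    intRange i j = PySem.List.pyRange (i : Int) (j : Int) 1 := by
  rw [PySem.List.pyRange_one]
  unfold intRange
  have hn : ((j : Int) - (i : Int)).toNat = j - i := by omega
  rw [hn, List.range'_eq_map_range, List.map_map]
  apply List.map_congr_left
  intro k hk
  simp

theorem intRange_length (i j : Nat) : (intRange i j).length = j - i := by
  simp [intRange]

theorem intRange_single (i : Nat) : intRange i (i + 1) = [(i : Int)] := by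
  unfold intRange
  have h : i + 1 - i = 1 := by omega
  rw [h]
  simp [List.range']

theorem sum2' (i : Nat) : ∀ d : Nat,
    2 * (intRange i (i + d)).sum =
      ((i + d : Nat) : Int) * (((i + d : Nat) : Int) - 1) - (i : Int) * ((i : Int) - 1) := by
  intro d
  induction d with
  | zero => simp [intRange]
  | succ d ih =>
    have hs : intRange i (i + d + 1) = intRange i (i + d) ++ [((i + d : Nat) : Int)] :=
      intRange_snoc i (i + d) (by omega)
    have he : i + (d + 1) = (i + d) + 1 := by omega
    rw [he, hs, List.sum_append]
    simp only [List.sum_cons, List.sum_nil, add_zero]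
    push_cast
    push_cast at ih
    linarith [ih]

theorem sum2 (i j : Nat) (h : i ≤ j) :
    2 * (intRange i j).sum = (j : Int) * ((j : Int) - 1) - (i : Int) * ((i : Int) - 1) := by
  have := sum2' i (j - i)
  have hj : i + (j - i) = j := by omega
  rw [hj] at this
  exact this

theorem sum_mono (i a b : Nat) (hia : i ≤ a) (h1 : 1 ≤ a) (hab : a < b) :
    (intRange i a).sum < (intRange i b).sum := by
  have ha := sum2 i a hia
  have hb := sum2 i b (by omega)
  have hq : (a : Int) * ((a : Int) - 1) < (b : Int) * ((b : Int) - 1) := by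
    have h1' : (1 : Int) ≤ (a : Int) := by exact_mod_cast h1
    have hab' : (a : Int) < (b : Int) := by exact_mod_cast hab
    nlinarith
  linarith

-- A's inner loop, after the first step, reaches the hit at m and returns the run [i, …, m-1]
theorem Ainner_some (t : Int) (n i m : Nat) (him : i + 2 ≤ m) (hmn : m ≤ n)
    (ht : (intRange i m).sum = t) :
    ∀ k j, m - j ≤ k → i + 1 ≤ j → j < m →
      csA_inner t n j (intRange i j) = some (intRange i m) := by
  intro k
  induction k with
  | zero => intro j hk hij hjm; omega
  | succ k ih =>
    intro j hk hij hjm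
    have hjn : j < n := lt_of_lt_of_le hjm hmn
    have hsnoc : intRange i (j + 1) = intRange i j ++ [(j : Int)] :=
      intRange_snoc i j (by omega)
    rw [csA_inner, dif_pos hjn]
    simp only [← hsnoc]
    by_cases hm : j + 1 = m
    · have hsum : (intRange i (j + 1)).sum = t := by rw [hm]; exact ht
      rw [if_neg (by omega), if_pos ⟨hsum, by rw [intRange_length]; omega⟩, hm]
    · have hlt : (intRange i (j + 1)).sum < t := by
        rw [← ht]; exact sum_mono i (j + 1) m (by omega) (by omega) (by omega)
      rw [if_neg (by omega), if_neg (by rintro ⟨h, _⟩; omega)]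
      exact ih (j + 1) (by omega) (by omega) (by omega)

-- with no valid run starting at i, A's inner loop returns none
theorem Ainner_none (t : Int) (n i : Nat)
    (hno : ∀ m, i + 2 ≤ m → m ≤ n → (intRange i m).sum ≠ t) :
    ∀ k j, n - j ≤ k → i + 1 ≤ j →
      csA_inner t n j (intRange i j) = none := by
  intro k
  induction k with
  | zero =>
    intro j hk hij
    rw [csA_inner, dif_neg (by omega)]
  | succ k ih =>
    intro j hk hij
    by_cases hjn : j < n
    · have hsnoc : intRange i (j + 1) = intRange i j ++ [(j : Int)] :=
        intRange_snoc i j (by omega)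
      rw [csA_inner, dif_pos hjn]
      simp only [← hsnoc]
      have hne : (intRange i (j + 1)).sum ≠ t := hno (j + 1) (by omega) (by omega)
      by_cases hgt : (intRange i (j + 1)).sum > t
      · rw [if_pos hgt]
      · rw [if_neg hgt, if_neg (by rintro ⟨h, _⟩; exact hne h)]
        exact ih (j + 1) (by omega) (by omega)
    · rw [csA_inner, dif_neg hjn]

theorem FA_some (t : Int) (n i m : Nat) (hin : i < n) (him : i + 2 ≤ m) (hmn : m ≤ n)
    (ht : (intRange i m).sum = t) :
    csA_inner t n i [] = some (intRange i m) := by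
  rw [csA_inner, dif_pos hin]
  simp only [List.nil_append, List.sum_cons, List.sum_nil, add_zero,
    List.length_cons, List.length_nil]
  have hit : (i : Int) < t := by
    rw [← ht]
    have := sum_mono i (i + 1) m (by omega) (by omega) (by omega)
    rw [intRange_single i] at this
    simpa using this
  rw [if_neg (by omega), if_neg (by rintro ⟨_, h⟩; omega)]
  have h1 : ([] : List Int) ++ [(i : Int)] = intRange i (i + 1) := by
    rw [intRange_single]; rfl
  rw [show ([(i : Int)] : List Int) = intRange i (i + 1) from (intRange_single i).symm]
  exact Ainner_some t n i m him hmn ht (m - (i + 1)) (i + 1) le_rfl le_rfl (by omega)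

theorem FA_none (t : Int) (n i : Nat) (hin : i < n)
    (hno : ∀ m, i + 2 ≤ m → m ≤ n → (intRange i m).sum ≠ t) :
    csA_inner t n i [] = none := by
  rw [csA_inner, dif_pos hin]
  simp only [List.nil_append, List.sum_cons, List.sum_nil, add_zero,
    List.length_cons, List.length_nil]
  by_cases hgt : (i : Int) > t
  · rw [if_pos hgt]
  · rw [if_neg hgt, if_neg (by rintro ⟨_, h⟩; omega)]
    rw [show ([(i : Int)] : List Int) = intRange i (i + 1) from (intRange_single i).symm]
    exact Ainner_none t n i hno (n - (i + 1)) (i + 1) le_rfl le_rfl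

theorem FA_inv (t : Int) (n i : Nat) (r : List Int) (hin : i < n)
    (h : csA_inner t n i [] = some r) :
    ∃ m, i + 2 ≤ m ∧ m ≤ n ∧ (intRange i m).sum = t ∧ r = intRange i m := by
  by_cases hex : ∃ m, i + 2 ≤ m ∧ m ≤ n ∧ (intRange i m).sum = t
  · obtain ⟨m, h1, h2, h3⟩ := hex
    rw [FA_some t n i m hin h1 h2 h3] at h
    exact ⟨m, h1, h2, h3, (Option.some.injEq _ _ ▸ h).symm⟩
  · push_neg at hex
    rw [FA_none t n i hin hex] at h
    exact absurd h (by simp)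

-- the sum equation in Good, translated to A's index-list sums
theorem good_of_sum (n : Nat) (t : Int) (i m : Nat) (him : i + 2 ≤ m) (hmn : m ≤ n)
    (ht : (intRange i m).sum = t) :
    Good n t (i : Int) ((m : Int) - (i : Int)) := by
  refine ⟨by omega, by omega, by omega, ?_⟩
  have hs := sum2 i m (by omega)
  rw [ht] at hs
  linear_combination hs

theorem sum_of_good (n : Nat) (t : Int) (i m : Nat) (him : i ≤ m)
    (hg : 2 * t = 2 * ((m : Int) - i) * i + ((m : Int) - i) * (((m : Int) - i) - 1)) :
    (intRange i m).sum = t := by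
  have hs := sum2 i m him
  linarith [hs, hg, sq_nonneg ((m : Int) - i)]

-- run representation: A's intRange is B's runI
theorem intRange_eq_runI (i m : Nat) (h : i ≤ m) :
    intRange i m = runI (i : Int) ((m : Int) - (i : Int)) := by
  rw [runI, intRange_eq_pyRange i m h]
  congr 1
  omega

theorem keyR_runI (i L : Int) (hL : 1 ≤ L) : keyR (runI i L) = i := by
  rw [runI, PySem.List.pyRange_one_cons (by omega : i < i + L)]
  rfl

-- B's body succeeds exactly on the Good pairs
theorem GB_some (n : Nat) (t i L : Int) (hg : Good n t i L) :
    GB n t L = some (runI i L) := by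
  obtain ⟨hL, hi, hn, he⟩ := hg
  have htri : PySem.Int.floordiv (L * (L - 1)) 2 = t - L * i := by
    have h2 : L * (L - 1) = 2 * (t - L * i) := by linear_combination -he
    rw [h2, PySem.Int.floordiv_eq_ediv_of_pos (by norm_num : (0 : Int) < 2)]
    exact Int.mul_ediv_cancel_left _ (by norm_num)
  unfold GB
  simp only [htri]
  have hrem : t - (t - L * i) = L * i := by ring
  rw [hrem]
  have hmod : PySem.Int.mod (L * i) L = 0 := by
    rw [PySem.Int.mod_eq_zero_iff_dvd]
    exact dvd_mul_right L i
  have hdiv : PySem.Int.floordiv (L * i) L = i := by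
    rw [PySem.Int.floordiv_eq_ediv_of_pos (by omega : (0 : Int) < L)]
    exact Int.mul_ediv_cancel_left _ (by omega)
  rw [if_pos ⟨mul_nonneg (by omega) hi, hmod⟩]
  simp only [hdiv]
  rw [if_pos hn]
  rfl

theorem GB_inv (n : Nat) (t L : Int) (r : List Int) (hL : 1 < L)
    (h : GB n t L = some r) :
    ∃ i, Good n t i L ∧ r = runI i L := by
  have heven : ∃ T : Int, L * (L - 1) = 2 * T := by
    rcases Int.even_mul_succ_self (L - 1) with ⟨k, hk⟩
    exact ⟨k, by linear_combination hk⟩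
  obtain ⟨T, hT⟩ := heven
  have htri : PySem.Int.floordiv (L * (L - 1)) 2 = T := by
    rw [hT, PySem.Int.floordiv_eq_ediv_of_pos (by norm_num : (0 : Int) < 2)]
    exact Int.mul_ediv_cancel_left _ (by norm_num)
  unfold GB at h
  simp only [htri] at h
  by_cases hc : 0 ≤ t - T ∧ PySem.Int.mod (t - T) L = 0
  · rw [if_pos hc] at h
    obtain ⟨hnn, hmod⟩ := hc
    rw [PySem.Int.mod_eq_zero_iff_dvd] at hmod
    obtain ⟨q, hq⟩ := hmod
    have hdiv : PySem.Int.floordiv (t - T) L = q := by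
      rw [hq, PySem.Int.floordiv_eq_ediv_of_pos (by omega : (0 : Int) < L)]
      exact Int.mul_ediv_cancel_left _ (by omega)
    simp only [hdiv] at h
    by_cases hfit : q + L ≤ (n : Int)
    · rw [if_pos hfit] at h
      have hr : r = PySem.List.pyRange q (q + L) 1 := by
        exact (Option.some.injEq _ _ ▸ h).symm
      have hqnn : 0 ≤ q := by nlinarith [hq, hnn]
      exact ⟨q, ⟨by omega, hqnn, hfit, by linear_combination 2 * hq - hT⟩, hr⟩
    · rw [if_neg hfit] at h
      exact absurd h (by simp)
  · rw [if_neg hc] at h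
    exact absurd h (by simp)

-- longer Good runs start strictly earlier
theorem good_mono (n : Nat) (t i L i' L' : Int)
    (h1 : Good n t i L) (h2 : Good n t i' L') (hLL : L' < L) : i < i' := by
  obtain ⟨hL, hi, _, he⟩ := h1
  obtain ⟨hL', hi', _, he'⟩ := h2
  have expand : (L - L') * (2 * i + L + L' - 1) =
      (2 * L * i + L * (L - 1)) - (2 * L' * i + L' * (L' - 1)) := by ring
  have hpos : 0 < (L - L') * (2 * i + L + L' - 1) := by
    apply mul_pos <;> omega
  have hkey : 2 * L' * i < 2 * L' * i' := by linarith
  have : (2 * L') * i < (2 * L') * i' := by linarith [hkey]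
  exact lt_of_mul_lt_mul_left this (by omega)

-- a foldl that conditionally appends is a filterMap
theorem foldl_opt {α β : Type} (g : α → Option β) (f : List β → α → List β)
    (hf : ∀ res x, f res x = res ++ (g x).toList) :
    ∀ (l : List α) (acc : List β), l.foldl f acc = acc ++ l.filterMap g := by
  intro l
  induction l with
  | nil => intro acc; simp
  | cons x xs ih =>
    intro acc
    rw [List.foldl_cons, hf, List.filterMap_cons]
    cases hgx : g x <;> simp [hgx, ih]

theorem A_eq (arr : List Int) (t : Int) :
    consecutiveSum arr t =
      (List.range arr.length).filterMap (fun i => csA_inner t arr.length i []) := by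
  unfold consecutiveSum
  rw [foldl_opt (fun i => csA_inner t arr.length i []) _
    (by intro res i; cases h : csA_inner t arr.length i [] <;> simp [h])]
  simp

theorem B_eq (arr : List Int) (t : Int) :
    consecutiveSum_alt arr t =
      (PySem.List.pyRange (arr.length : Int) 1 (-1)).filterMap (GB arr.length t) := by
  unfold consecutiveSum_alt
  rw [foldl_opt (GB arr.length t) _
    (by intro res L; simp only [GB]; split_ifs <;> simp)]
  simp

theorem memX (arr : List Int) (t : Int) (r : List Int) :
    r ∈ (List.range arr.length).filterMap (fun i => csA_inner t arr.length i []) ↔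
      ∃ i L : Int, Good arr.length t i L ∧ r = runI i L := by
  rw [List.mem_filterMap]
  constructor
  · rintro ⟨i, hi, hsome⟩
    rw [List.mem_range] at hi
    obtain ⟨m, h1, h2, h3, h4⟩ := FA_inv t arr.length i r hi hsome
    exact ⟨(i : Int), (m : Int) - i, good_of_sum arr.length t i m h1 h2 h3,
      by rw [h4]; exact intRange_eq_runI i m (by omega)⟩
  · rintro ⟨i, L, hg, hr⟩
    obtain ⟨hL, hi, hn, he⟩ := hg
    refine ⟨i.toNat, List.mem_range.mpr (by omega), ?_⟩
    have hic : ((i.toNat : Nat) : Int) = i := by omega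
    have hmc : (((i + L).toNat : Nat) : Int) = i + L := by omega
    have hsum : (intRange i.toNat (i + L).toNat).sum = t := by
      apply sum_of_good arr.length t i.toNat (i + L).toNat (by omega)
      rw [hic, hmc]
      linear_combination he
    rw [FA_some t arr.length i.toNat (i + L).toNat (by omega) (by omega) (by omega) hsum]
    congr 1
    rw [hr, intRange_eq_runI i.toNat (i + L).toNat (by omega), hic, hmc]
    congr 1
    omega

theorem memY (arr : List Int) (t : Int) (r : List Int) :
    r ∈ (PySem.List.pyRange (arr.length : Int) 1 (-1)).filterMap (GB arr.length t) ↔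
      ∃ i L : Int, Good arr.length t i L ∧ r = runI i L := by
  rw [List.mem_filterMap]
  constructor
  · rintro ⟨L, hL, hsome⟩
    rw [PySem.List.mem_pyRange_neg_one] at hL
    obtain ⟨i, hg, hr⟩ := GB_inv arr.length t L r hL.1 hsome
    exact ⟨i, L, hg, hr⟩
  · rintro ⟨i, L, hg, hr⟩
    refine ⟨L, ?_, ?_⟩
    · rw [PySem.List.mem_pyRange_neg_one]
      obtain ⟨hL, hi, hn, _⟩ := hg
      exact ⟨by omega, by omega⟩
    · rw [GB_some arr.length t i L hg, hr]

theorem pwX (arr : List Int) (t : Int) :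
    ((List.range arr.length).filterMap (fun i => csA_inner t arr.length i [])).Pairwise
      (fun r s => keyR r < keyR s) := by
  rw [List.pairwise_filterMap]
  have := List.pairwise_lt_range (n := arr.length)
  apply this.imp_of_mem
  intro i i' hi hi' hlt r hr r' hr'
  obtain ⟨m, h1, _, _, h4⟩ := FA_inv t arr.length i r (List.mem_range.mp hi) hr
  obtain ⟨m', h1', _, _, h4'⟩ := FA_inv t arr.length i' r' (List.mem_range.mp hi') hr'
  rw [h4, intRange_eq_runI i m (by omega), keyR_runI _ _ (by omega)]
  rw [h4', intRange_eq_runI i' m' (by omega), keyR_runI _ _ (by omega)]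
  exact_mod_cast hlt

theorem pwY (arr : List Int) (t : Int) :
    ((PySem.List.pyRange (arr.length : Int) 1 (-1)).filterMap (GB arr.length t)).Pairwise
      (fun r s => keyR r < keyR s) := by
  rw [List.pairwise_filterMap]
  have hpw : (PySem.List.pyRange (arr.length : Int) 1 (-1)).Pairwise (fun a b => b < a) := by
    rw [PySem.List.pyRange_neg_one_eq_reverse, List.pairwise_reverse]
    exact PySem.List.pairwise_lt_pyRange_one _ _
  have hmem : ∀ x ∈ PySem.List.pyRange (arr.length : Int) 1 (-1), 1 < x := by
    intro x hx
    exact (PySem.List.mem_pyRange_neg_one.mp hx).1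
  apply hpw.imp_of_mem
  intro L L' hL hL' hlt r hr r' hr'
  obtain ⟨i, hg, hri⟩ := GB_inv arr.length t L r (hmem L hL) hr
  obtain ⟨i', hg', hri'⟩ := GB_inv arr.length t L' r' (hmem L' hL') hr'
  rw [hri, keyR_runI _ _ (by have := hg.1; omega)]
  rw [hri', keyR_runI _ _ (by have := hg'.1; omega)]
  exact good_mono arr.length t i L i' L' hg hg' hlt

theorem nodup_of_pw_key {l : List (List Int)} (h : l.Pairwise (fun r s => keyR r < keyR s)) :
    l.Nodup := by
  apply h.imp
  intro a b hab
  intro heq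
  rw [heq] at hab
  exact lt_irrefl _ hab

-- ===== VERDICT (by name: the statement is the Claim_ definition above) =====
theorem consecutiveSum_spec : Claim_equal_consecutiveSum := by
  intro arr target _
  unfold Spec_consecutiveSum
  rw [A_eq, B_eq]
  apply List.Perm.eq_of_pairwise
    (le := fun r s => keyR r < keyR s)
  · intro a b _ _ h1 h2
    exact absurd h1 (lt_asymm h2)
  · exact pwX arr target
  · exact pwY arr target
  · rw [List.perm_ext_iff_of_nodup (nodup_of_pw_key (pwX arr target))
      (nodup_of_pw_key (pwY arr target))]
    intro r
    rw [memX, memY]
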